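-- pv_equiv track=rewrite | github.com/sangjun19/CodingTest | n x m 표 이동4(실패).py | dp
-- ===== SOURCE A (Python) =====
-- def dp(n, m, item, wall):
--     ret = [[[0 for _ in range(1 << len(item))] for _ in range(m)] for _ in range(n)]
--     ret[0][0][0] = 1
--
--     for y in range(n):
--         for x in range(m):
--             for mask in range(1 << len(item)):
--                 if ret[y][x][mask] == 0:
--                     continue
--                 for dy, dx in [(0, 1), (1, 0)]:
--                     ny, nx = y + dy, x + dx
--                     if ny < n and nx < m and (ny, nx) not in wall:
--                         new_mask = mask
--                         if (ny, nx) in item: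
--                             new_mask |= 1 << item.index((ny, nx)) # 몇 번째 아이템인지 찾아서 비트마스크로 표현
--                         ret[ny][nx][new_mask] += ret[y][x][mask] # 가능한 경우의 수를 누적
--
--     return ret[n - 1][m - 1][(1 << len(item)) - 1] % 1000000007
-- ===== SOURCE B (Python) =====
-- def dp(n, m, item, wall):
--     # Pull-based DP with a rolling row: cell (y, x) sums the ways arriving from
--     # (y-1, x) and (y, x-1) instead of pushing contributions forward through a
--     # full n*m table as A does.
--     k = len(item)
--     size = 1 << k
--     prev = None
--     for y in range(n):
--         cur = []
--         for x in range(m):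
--             cell = [0] * size
--             if y == 0 and x == 0:
--                 cell[0] = 1
--             elif (y, x) not in wall:
--                 bit = (1 << item.index((y, x))) if (y, x) in item else 0
--                 for mask in range(size):
--                     total = 0
--                     if bit == 0:
--                         if y > 0:
--                             total += prev[x][mask]
--                         if x > 0:
--                             total += cur[x - 1][mask]
--                     elif mask & bit:
--                         if y > 0:
--                             total += prev[x][mask] + prev[x][mask ^ bit]
--                         if x > 0:
--                             total += cur[x - 1][mask] + cur[x - 1][mask ^ bit]
--                     cell[mask] = total
--             cur.append(cell)
--         prev = cur
--     return prev[m - 1][size - 1] % 1000000007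
-- ===== Notes on version B (the rewrite author's own statement) =====
-- stated objective: alternative
-- what changed: A pushes each nonzero (cell,mask) state forward into a full n*m*2^k table in row-major order; B computes each cell by pulling from its up/left neighbours with a two-term mask formula, keeping only a rolling previous/current row instead of the whole table.
import Mathlib
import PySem

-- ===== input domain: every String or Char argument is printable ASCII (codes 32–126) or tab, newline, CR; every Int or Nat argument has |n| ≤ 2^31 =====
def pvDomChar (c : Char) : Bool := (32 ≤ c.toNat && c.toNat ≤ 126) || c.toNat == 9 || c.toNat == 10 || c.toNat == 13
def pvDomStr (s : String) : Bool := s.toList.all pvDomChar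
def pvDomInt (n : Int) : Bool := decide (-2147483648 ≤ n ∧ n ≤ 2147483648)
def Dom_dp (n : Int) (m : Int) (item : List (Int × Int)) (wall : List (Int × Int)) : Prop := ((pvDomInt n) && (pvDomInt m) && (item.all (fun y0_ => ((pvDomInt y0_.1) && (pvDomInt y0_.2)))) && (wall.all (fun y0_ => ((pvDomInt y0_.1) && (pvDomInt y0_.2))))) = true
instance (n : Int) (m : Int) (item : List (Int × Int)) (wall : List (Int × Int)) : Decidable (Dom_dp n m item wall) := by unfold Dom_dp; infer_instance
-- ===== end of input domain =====

-- B replaces A's push-based DP over a full n×m×2^k table by a pull-based DP that keeps only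
-- a rolling previous/current row (objective: alternative decomposition; equal asymptotic cost).

-- ===== PORT A =====

-- `1 << item.index(c)` (only evaluated when `c ∈ item`; `index?` is first occurrence, like Python)
def pvBit (item : List (Int × Int)) (c : Int × Int) : Nat :=
  2 ^ ((PySem.List.index? item c).getD 0)

-- A's `new_mask = mask; if (ny,nx) in item: new_mask |= 1 << item.index((ny,nx))`
def pvNewM (item : List (Int × Int)) (c : Int × Int) (mk : Nat) : Nat :=
  if c ∈ item then mk ||| pvBit item c else mk

-- ret[y][x][mk]  (indices produced by the loops are always in range)
def pvGet3 (ret : List (List (List Int))) (y x mk : Nat) : Int :=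
  ((ret.getD y []).getD x []).getD mk 0

-- ret[y][x][mk] = v
def pvSet3 (ret : List (List (List Int))) (y x mk : Nat) (v : Int) : List (List (List Int)) :=
  ret.set y ((ret.getD y []).set x (((ret.getD y []).getD x []).set mk v))

-- the body of A's innermost `for dy, dx in [(0,1),(1,0)]` loop
def pvPush (n m : Int) (item wall : List (Int × Int)) (ret : List (List (List Int)))
    (y x mk : Nat) : List (List (List Int)) :=
  [((0:Int), (1:Int)), (1, 0)].foldl (fun ret d =>
    let ny : Int := (y : Int) + d.1
    let nx : Int := (x : Int) + d.2
    if ny < n ∧ nx < m ∧ (ny, nx) ∉ wall then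
      pvSet3 ret ny.toNat nx.toNat (pvNewM item (ny, nx) mk)
        (pvGet3 ret ny.toNat nx.toNat (pvNewM item (ny, nx) mk) + pvGet3 ret y x mk)
    else ret) ret

-- A: build the zero table, seed ret[0][0][0] = 1, push row-major, read the corner.
-- (range(n) for an Int n enumerates 0,…,n-1 and is empty for n ≤ 0; `List.range n.toNat`
-- enumerates exactly those values, here as the Nat indices of the table.)
def dp (n : Int) (m : Int) (item : List (Int × Int)) (wall : List (Int × Int)) : Int :=
  let K := 2 ^ item.length
  let ret0 := List.replicate n.toNat (List.replicate m.toNat (List.replicate K (0:Int)))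
  let ret1 := pvSet3 ret0 0 0 0 1
  let ret2 := (List.range n.toNat).foldl (fun ret y =>
    (List.range m.toNat).foldl (fun ret x =>
      (List.range K).foldl (fun ret mk =>
        if pvGet3 ret y x mk = 0 then ret
        else pvPush n m item wall ret y x mk) ret) ret) ret1
  PySem.Int.mod (pvGet3 ret2 (n-1).toNat (m-1).toNat (K-1)) 1000000007

-- ===== PORT B =====

-- B's `bit = (1 << item.index((y,x))) if (y,x) in item else 0`
def pvBitv (item : List (Int × Int)) (c : Int × Int) : Nat :=
  if c ∈ item then pvBit item c else 0

-- one cell of the current row: pull from prev[x] (above) and cur[x-1] (left)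
def pvCell (item wall : List (Int × Int)) (prev cur : List (List Int))
    (y x K : Nat) : List Int :=
  if y = 0 ∧ x = 0 then (List.replicate K (0:Int)).set 0 1
  else if ((y:Int), (x:Int)) ∈ wall then List.replicate K 0
  else
    let bit := pvBitv item ((y:Int), (x:Int))
    (List.range K).map (fun mk =>
      if bit = 0 then
        (if 0 < y then (prev.getD x []).getD mk 0 else 0) +
        (if 0 < x then (cur.getD (x-1) []).getD mk 0 else 0)
      else if mk &&& bit ≠ 0 then
        (if 0 < y then (prev.getD x []).getD mk 0 + (prev.getD x []).getD (mk ^^^ bit) 0 else 0) +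
        (if 0 < x then (cur.getD (x-1) []).getD mk 0 + (cur.getD (x-1) []).getD (mk ^^^ bit) 0 else 0)
      else 0)

-- B: rolling-row pull DP; `prev` is the finished previous row, `cur` the row being built.
def dp_alt (n : Int) (m : Int) (item : List (Int × Int)) (wall : List (Int × Int)) : Int :=
  let K := 2 ^ item.length
  let last := (List.range n.toNat).foldl (fun prev y =>
      (List.range m.toNat).foldl (fun cur x =>
        cur ++ [pvCell item wall prev cur y x K]) []) []
  PySem.Int.mod ((last.getD (m-1).toNat []).getD (K-1) 0) 1000000007

-- ===== PRECONDITION & SPEC =====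
-- Pre_ excludes exactly n ≤ 0 or m ≤ 0, where A raises IndexError on `ret[0][0][0] = 1`
-- (the table has no row 0 / no column 0); B raises there too (prev is still None).
def Pre_dp (n : Int) (m : Int) (item : List (Int × Int)) (wall : List (Int × Int)) : Prop :=
  1 ≤ n ∧ 1 ≤ m
instance (n : Int) (m : Int) (item : List (Int × Int)) (wall : List (Int × Int)) : Decidable (Pre_dp n m item wall) := by unfold Pre_dp; infer_instance

def pvWitness_dp : Int × Int × (List (Int × Int)) × (List (Int × Int)) :=
  (2, 3, [(0, 1), (1, 1)], [(1, 0)])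

def Spec_dp (n : Int) (m : Int) (item : List (Int × Int)) (wall : List (Int × Int)) (out : Int) : Prop := out = dp_alt n m item wall
instance (n : Int) (m : Int) (item : List (Int × Int)) (wall : List (Int × Int)) (out : Int) : Decidable (Spec_dp n m item wall out) := by unfold Spec_dp; infer_instance

-- ===== CLAIM (what is proved, stated in full; the proofs are below) =====
def Claim_equal_dp : Prop := ∀ (n : Int) (m : Int) (item : List (Int × Int)) (wall : List (Int × Int)), Dom_dp n m item wall → Pre_dp n m item wall → Spec_dp n m item wall (dp n m item wall)

-- ===== LEMMAS AND PROOFS =====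

-- The common mathematical value both programs compute: pvF item wall y x mk = number of
-- right/down paths from (0,0) to (y,x) avoiding walls (start cell excepted) with mask mk.
def pvF (item wall : List (Int × Int)) (y x mk : Nat) : Int :=
  if y = 0 ∧ x = 0 then (if mk = 0 then 1 else 0)
  else if ((y:Int), (x:Int)) ∈ wall then 0
  else
    (if 0 < y then
        (if pvBitv item ((y:Int), (x:Int)) = 0 then pvF item wall (y-1) x mk
         else if mk &&& pvBitv item ((y:Int), (x:Int)) ≠ 0 then
           pvF item wall (y-1) x mk + pvF item wall (y-1) x (mk ^^^ pvBitv item ((y:Int), (x:Int)))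
         else 0)
      else 0) +
    (if 0 < x then
        (if pvBitv item ((y:Int), (x:Int)) = 0 then pvF item wall y (x-1) mk
         else if mk &&& pvBitv item ((y:Int), (x:Int)) ≠ 0 then
           pvF item wall y (x-1) mk + pvF item wall y (x-1) (mk ^^^ pvBitv item ((y:Int), (x:Int)))
         else 0)
      else 0)
termination_by y + x
decreasing_by all_goals omega

-- ---------- small facts about bits and the item index ----------

lemma pvBitv_cases (item : List (Int × Int)) (c : Int × Int) :
    pvBitv item c = 0 ∨ ∃ i, i < item.length ∧ pvBitv item c = 2 ^ i := by
  unfold pvBitv pvBit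
  by_cases h : c ∈ item
  · obtain ⟨i, hi⟩ := Option.isSome_iff_exists.1 ((PySem.List.index?_isSome_iff item c).2 h)
    obtain ⟨pre, suf, hxs, hlen, -⟩ := (PySem.List.index?_eq_some_iff item c i).1 hi
    refine Or.inr ⟨i, ?_, by rw [if_pos h, hi]; rfl⟩
    subst hxs
    simp [List.length_append]
    omega
  · exact Or.inl (by simp [h])

lemma pvNewM_eq_or (item : List (Int × Int)) (c : Int × Int) (mk : Nat) :
    pvNewM item c mk = mk ||| pvBitv item c := by
  unfold pvNewM pvBitv
  by_cases h : c ∈ item <;> simp [h]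

lemma pvBitv_lt (item : List (Int × Int)) (c : Int × Int) :
    pvBitv item c < 2 ^ item.length := by
  rcases pvBitv_cases item c with h | ⟨i, hi, h⟩ <;> rw [h]
  · positivity
  · exact Nat.pow_lt_pow_right one_lt_two hi

lemma pvLor_two_pow_eq_iff (s i mk : Nat) :
    s ||| 2 ^ i = mk ↔ (mk.testBit i ∧ (s = mk ∨ s = mk ^^^ 2 ^ i)) := by
  constructor
  · intro h
    subst h
    refine ⟨by simp [Nat.testBit_lor, Nat.testBit_two_pow], ?_⟩
    by_cases hb : s.testBit i
    · refine Or.inl (Nat.eq_of_testBit_eq fun j => ?_)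
      by_cases hj : i = j
      · subst hj
        simp [Nat.testBit_lor, Nat.testBit_two_pow, hb]
      · simp [Nat.testBit_lor, Nat.testBit_two_pow, hj]
    · refine Or.inr (Nat.eq_of_testBit_eq fun j => ?_)
      by_cases hj : i = j
      · subst hj
        simp [Nat.testBit_xor, Nat.testBit_lor, Nat.testBit_two_pow, hb]
      · simp [Nat.testBit_xor, Nat.testBit_lor, Nat.testBit_two_pow, hj]
  · rintro ⟨hbit, h | h⟩ <;> subst h <;> refine Nat.eq_of_testBit_eq fun j => ?_
    · by_cases hj : i = j
      · subst hj
        simp [Nat.testBit_lor, Nat.testBit_two_pow, hbit]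
      · simp [Nat.testBit_lor, Nat.testBit_two_pow, hj]
    · by_cases hj : i = j
      · subst hj
        simp [Nat.testBit_lor, Nat.testBit_xor, Nat.testBit_two_pow, hbit]
      · simp [Nat.testBit_lor, Nat.testBit_xor, Nat.testBit_two_pow, hj]

-- ∑ over all source masks that are mapped to mk by OR-ing `bit` — the pull form of the push.
lemma pvBitsum (f : Nat → Int) (k i mk : Nat) (hi : i < k) (hmk : mk < 2 ^ k) :
    (∑ s ∈ Finset.range (2 ^ k), if s ||| 2 ^ i = mk then f s else 0)
      = if mk &&& 2 ^ i ≠ 0 then f mk + f (mk ^^^ 2 ^ i) else 0 := by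
  have hxlt : mk ^^^ 2 ^ i < 2 ^ k :=
    Nat.xor_lt_two_pow hmk (Nat.pow_lt_pow_right one_lt_two hi)
  have hand : mk &&& 2 ^ i ≠ 0 ↔ mk.testBit i := by
    rw [Nat.and_two_pow]
    cases h : mk.testBit i <;> simp
  by_cases hb : mk.testBit i
  · have hne : mk ≠ mk ^^^ 2 ^ i := by
      intro h
      have := congrArg (fun z => z.testBit i) h
      simp [Nat.testBit_xor, Nat.testBit_two_pow] at this
    rw [if_pos (hand.2 hb)]
    have hsplit : ∀ s ∈ Finset.range (2 ^ k),
        (if s ||| 2 ^ i = mk then f s else 0)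
          = (if s = mk then f s else 0) + (if s = mk ^^^ 2 ^ i then f s else 0) := by
      intro s _
      by_cases h1 : s = mk
      · subst h1
        rw [if_pos (by rw [pvLor_two_pow_eq_iff]; exact ⟨hb, Or.inl rfl⟩)]
        rw [if_pos rfl, if_neg hne]
        ring
      · by_cases h2 : s = mk ^^^ 2 ^ i
        · subst h2
          rw [if_pos (by rw [pvLor_two_pow_eq_iff]; exact ⟨hb, Or.inr rfl⟩)]
          rw [if_neg (fun h => hne h.symm), if_pos rfl]
          ring
        · rw [if_neg, if_neg h1, if_neg h2]
          · ring
          · rw [pvLor_two_pow_eq_iff]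
            rintro ⟨-, h | h⟩ <;> [exact h1 h; exact h2 h]
    rw [Finset.sum_congr rfl hsplit, Finset.sum_add_distrib,
      Finset.sum_ite_eq' _ mk f, Finset.sum_ite_eq' _ (mk ^^^ 2 ^ i) f,
      if_pos (Finset.mem_range.2 hmk), if_pos (Finset.mem_range.2 hxlt)]
  · rw [if_neg (fun h => hb (hand.1 h))]
    refine Finset.sum_eq_zero fun s _ => ?_
    rw [if_neg]
    rw [pvLor_two_pow_eq_iff]
    rintro ⟨h, -⟩
    exact hb h

-- ---------- the table as a function ----------

def pvTbl (N M K : Nat) (g : Nat → Nat → Nat → Int) : List (List (List Int)) :=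
  (List.range N).map fun y => (List.range M).map fun x => (List.range K).map fun mk => g y x mk

lemma pvGet3_tbl {N M K : Nat} (g : Nat → Nat → Nat → Int) {y x mk : Nat}
    (hy : y < N) (hx : x < M) (hmk : mk < K) :
    pvGet3 (pvTbl N M K g) y x mk = g y x mk := by
  unfold pvGet3 pvTbl
  rw [PySem.List.getD_map_range _ _ _ _ hy, PySem.List.getD_map_range _ _ _ _ hx,
    PySem.List.getD_map_range _ _ _ _ hmk]

lemma pvSet_map_range {α : Type} (L : Nat) (f : Nat → α) (i : Nat) (v : α) (hi : i < L) :
    ((List.range L).map f).set i v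
      = (List.range L).map (fun j => if j = i then v else f j) := by
  apply List.ext_getElem
  · simp
  · intro j h1 h2
    simp only [List.getElem_set, List.getElem_map, List.getElem_range]
    by_cases h : i = j <;> simp [h, eq_comm]

lemma pvSet3_tbl {N M K : Nat} (g : Nat → Nat → Nat → Int) {y x mk : Nat} (v : Int)
    (hy : y < N) (hx : x < M) (hmk : mk < K) :
    pvSet3 (pvTbl N M K g) y x mk v
      = pvTbl N M K (fun y' x' mk' => if y' = y ∧ x' = x ∧ mk' = mk then v else g y' x' mk') := by
  unfold pvSet3 pvTbl
  rw [PySem.List.getD_map_range _ _ _ _ hy, PySem.List.getD_map_range _ _ _ _ hx,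
    pvSet_map_range _ _ _ _ hmk, pvSet_map_range _ _ _ _ hx, pvSet_map_range _ _ _ _ hy]
  refine List.map_congr_left fun y' _ => ?_
  by_cases hy' : y' = y
  · subst hy'
    rw [if_pos rfl]
    refine List.map_congr_left fun x' _ => ?_
    by_cases hx' : x' = x
    · subst hx'
      rw [if_pos rfl]
      refine List.map_congr_left fun mk' _ => ?_
      by_cases hmk' : mk' = mk <;> simp [hmk']
    · rw [if_neg hx']
      refine List.map_congr_left fun mk' _ => ?_
      simp [hx']
  · rw [if_neg hy']
    refine List.map_congr_left fun x' _ => ?_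
    refine List.map_congr_left fun mk' _ => ?_
    simp [hy']

lemma pvTbl_congr {N M K : Nat} {g g' : Nat → Nat → Nat → Int}
    (h : ∀ y < N, ∀ x < M, ∀ mk < K, g y x mk = g' y x mk) :
    pvTbl N M K g = pvTbl N M K g' := by
  unfold pvTbl
  refine List.map_congr_left fun y hy => ?_
  refine List.map_congr_left fun x hx => ?_
  refine List.map_congr_left fun mk hmk => ?_
  exact h y (List.mem_range.1 hy) x (List.mem_range.1 hx) mk (List.mem_range.1 hmk)

-- ---------- the A-side invariant ----------

def pvInit (y x mk : Nat) : Int := if y = 0 ∧ x = 0 ∧ mk = 0 then 1 else 0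

-- total amount cell (py,px) pushes into entry (y,x,mk) over its whole processing,
-- assuming its own entries hold the final values pvF
def pvContrib (item wall : List (Int × Int)) (py px y x mk : Nat) : Int :=
  if ((y = py ∧ x = px + 1) ∨ (y = py + 1 ∧ x = px)) ∧ ((y:Int), (x:Int)) ∉ wall then
    ∑ s ∈ Finset.range (2 ^ item.length),
      if mk = pvNewM item ((y:Int), (x:Int)) s then pvF item wall py px s else 0
  else 0

-- table contents after the first t rows have been fully processed
def pvValRows (item wall : List (Int × Int)) (M t y x mk : Nat) : Int :=
  pvInit y x mk + ∑ py ∈ Finset.range t, ∑ px ∈ Finset.range M, pvContrib item wall py px y x mk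

-- … and additionally the first s cells of row t
def pvValMid (item wall : List (Int × Int)) (M t s y x mk : Nat) : Int :=
  pvValRows item wall M t y x mk + ∑ px ∈ Finset.range s, pvContrib item wall t px y x mk

-- amount the single state (t,s,smk) pushes into entry (y,x,mk) (with source values g0)
def pvPushAmt (n m : Int) (item wall : List (Int × Int)) (g0 : Nat → Nat → Nat → Int)
    (t s smk y x mk : Nat) : Int :=
  (if (((t:Int)) < n ∧ (((s+1:Nat):Int)) < m ∧ (((t:Int)), ((s+1:Nat):Int)) ∉ wall)
      ∧ y = t ∧ x = s + 1 ∧ mk = pvNewM item (((t:Int)), ((s+1:Nat):Int)) smk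
    then g0 t s smk else 0)
  + (if ((((t+1:Nat):Int)) < n ∧ ((s:Int)) < m ∧ (((t+1:Nat):Int), ((s:Int))) ∉ wall)
      ∧ y = t + 1 ∧ x = s ∧ mk = pvNewM item (((t+1:Nat):Int), ((s:Int))) smk
    then g0 t s smk else 0)

lemma pvNewM_lt (item : List (Int × Int)) (c : Int × Int) {mk : Nat}
    (hmk : mk < 2 ^ item.length) : pvNewM item c mk < 2 ^ item.length := by
  rw [pvNewM_eq_or]
  exact Nat.or_lt_two_pow hmk (pvBitv_lt item c)

-- a conditional accumulate on a function table
lemma pvBump_tbl {N M K : Nat} (g : Nat → Nat → Nat → Int) {a b c : Nat} (w : Int)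
    (ha : a < N) (hb : b < M) (hc : c < K) :
    pvSet3 (pvTbl N M K g) a b c (pvGet3 (pvTbl N M K g) a b c + w)
      = pvTbl N M K (fun y x mk => g y x mk + if y = a ∧ x = b ∧ mk = c then w else 0) := by
  rw [pvGet3_tbl g ha hb hc, pvSet3_tbl g _ ha hb hc]
  refine pvTbl_congr fun y _ x _ mk _ => ?_
  by_cases h : y = a ∧ x = b ∧ mk = c
  · obtain ⟨e1, e2, e3⟩ := h
    subst e1
    subst e2
    subst e3
    rw [if_pos ⟨rfl, rfl, rfl⟩, if_pos ⟨rfl, rfl, rfl⟩]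
  · rw [if_neg h, if_neg h]
    ring

-- a state never pushes into its own cell
lemma pvPushAmt_src (n m : Int) (item wall : List (Int × Int)) (g0 : Nat → Nat → Nat → Int)
    (t s smk mk : Nat) : pvPushAmt n m item wall g0 t s smk t s mk = 0 := by
  unfold pvPushAmt
  rw [if_neg, if_neg]
  · ring
  · rintro ⟨-, h, -⟩
    omega
  · rintro ⟨-, -, h, -⟩
    omega

-- collapsing a sum of a guarded point mass
lemma pvSumIte' (A : Int) (L a : Nat) (P : Prop) [Decidable P] :
    (∑ j ∈ Finset.range L, if P ∧ j = a then A else 0) = if P ∧ a < L then A else 0 := by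
  by_cases hP : P
  · simp only [hP, true_and]
    rw [Finset.sum_ite_eq' _ a (fun _ => A)]
    simp [Finset.mem_range]
  · simp [hP]

-- a predecessor's contribution, in the two-term pull form
lemma pvContrib_pred (item wall : List (Int × Int)) (py px y x mk : Nat)
    (hmk : mk < 2 ^ item.length)
    (hpos : (y = py ∧ x = px + 1) ∨ (y = py + 1 ∧ x = px))
    (hw : ((y:Int), (x:Int)) ∉ wall) :
    pvContrib item wall py px y x mk
      = (if pvBitv item ((y:Int), (x:Int)) = 0 then pvF item wall py px mk
         else if mk &&& pvBitv item ((y:Int), (x:Int)) ≠ 0 then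
           pvF item wall py px mk + pvF item wall py px (mk ^^^ pvBitv item ((y:Int), (x:Int)))
         else 0) := by
  simp only [pvContrib]
  rw [if_pos ⟨hpos, hw⟩]
  have hsum : ∀ s, (if mk = pvNewM item ((y:Int), (x:Int)) s then pvF item wall py px s else 0)
      = (if s ||| pvBitv item ((y:Int), (x:Int)) = mk then pvF item wall py px s else 0) := by
    intro s
    rw [pvNewM_eq_or]
    exact if_congr eq_comm rfl rfl
  rw [Finset.sum_congr rfl (fun s _ => hsum s)]
  rcases pvBitv_cases item ((y:Int), (x:Int)) with hb | ⟨i, hi, hb⟩ <;> rw [hb]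
  · rw [if_pos rfl]
    have : ∀ s, (if s ||| 0 = mk then pvF item wall py px s else 0)
        = (if s = mk then pvF item wall py px s else 0) := by
      intro s
      simp
    rw [Finset.sum_congr rfl (fun s _ => this s), Finset.sum_ite_eq' _ mk,
      if_pos (Finset.mem_range.2 hmk)]
  · rw [pvBitsum _ _ _ _ hi hmk, if_neg (show ¬((2:Nat) ^ i = 0) from (by positivity : (0:Nat) < 2 ^ i).ne')]

-- the closed-cell lemma: once every predecessor of (y,x) is inside the processed prefix,
-- the accumulated value is the final value pvF
lemma pvValMid_closed (item wall : List (Int × Int)) (M t s y x mk : Nat)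
    (hx : x < M) (hmk : mk < 2 ^ item.length)
    (h1 : 0 < y → (y - 1 < t ∨ (y - 1 = t ∧ x < s)))
    (h2 : 0 < x → (y < t ∨ (y = t ∧ x - 1 < s))) :
    pvValMid item wall M t s y x mk = pvF item wall y x mk := by
  have point : ∀ py px : Nat, pvContrib item wall py px y x mk
      = (if (0 < x ∧ py = y) ∧ px = x - 1 then pvContrib item wall y (x-1) y x mk else 0)
      + (if (0 < y ∧ py = y - 1) ∧ px = x then pvContrib item wall (y-1) x y x mk else 0) := by
    intro py px
    by_cases c1 : (0 < x ∧ py = y) ∧ px = x - 1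
    · obtain ⟨⟨hx0, e1⟩, e2⟩ := c1
      subst e1
      subst e2
      rw [if_pos ⟨⟨hx0, rfl⟩, rfl⟩, if_neg (by rintro ⟨⟨hy0, e⟩, -⟩; omega)]
      ring
    · by_cases c2 : (0 < y ∧ py = y - 1) ∧ px = x
      · obtain ⟨⟨hy0, e1⟩, e2⟩ := c2
        subst e1
        subst e2
        rw [if_neg c1, if_pos ⟨⟨hy0, rfl⟩, rfl⟩]
        ring
      · rw [if_neg c1, if_neg c2]
        simp only [pvContrib]
        rw [if_neg]
        · ring
        · rintro ⟨e | e, -⟩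
          · exact c1 ⟨⟨by omega, by omega⟩, by omega⟩
          · exact c2 ⟨⟨by omega, by omega⟩, by omega⟩
  have rowSum : ∀ py L : Nat, (∑ px ∈ Finset.range L, pvContrib item wall py px y x mk)
      = (if (0 < x ∧ py = y) ∧ x - 1 < L then pvContrib item wall y (x-1) y x mk else 0)
      + (if (0 < y ∧ py = y - 1) ∧ x < L then pvContrib item wall (y-1) x y x mk else 0) := by
    intro py L
    rw [Finset.sum_congr rfl (fun px _ => point py px), Finset.sum_add_distrib,
      pvSumIte', pvSumIte']
  have dblSum : (∑ py ∈ Finset.range t, ∑ px ∈ Finset.range M, pvContrib item wall py px y x mk)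
      = (if ((0 < x ∧ x - 1 < M) ∧ y < t) then pvContrib item wall y (x-1) y x mk else 0)
      + (if ((0 < y ∧ x < M) ∧ y - 1 < t) then pvContrib item wall (y-1) x y x mk else 0) := by
    rw [Finset.sum_congr rfl (fun py _ => rowSum py M)]
    rw [Finset.sum_add_distrib]
    have e1 : ∀ py : Nat, (if (0 < x ∧ py = y) ∧ x - 1 < M then pvContrib item wall y (x-1) y x mk else 0)
        = (if (0 < x ∧ x - 1 < M) ∧ py = y then pvContrib item wall y (x-1) y x mk else 0) := by
      intro py
      exact if_congr (by tauto) rfl rfl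
    have e2 : ∀ py : Nat, (if (0 < y ∧ py = y - 1) ∧ x < M then pvContrib item wall (y-1) x y x mk else 0)
        = (if (0 < y ∧ x < M) ∧ py = y - 1 then pvContrib item wall (y-1) x y x mk else 0) := by
      intro py
      exact if_congr (by tauto) rfl rfl
    rw [Finset.sum_congr rfl (fun py _ => e1 py), Finset.sum_congr rfl (fun py _ => e2 py),
      pvSumIte', pvSumIte']
  simp only [pvValMid, pvValRows]
  rw [dblSum, rowSum t s]
  have hCL : (if ((0 < x ∧ x - 1 < M) ∧ y < t) then pvContrib item wall y (x-1) y x mk else 0)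
      + (if (0 < x ∧ t = y) ∧ x - 1 < s then pvContrib item wall y (x-1) y x mk else 0)
      = (if 0 < x then pvContrib item wall y (x-1) y x mk else 0) := by
    by_cases hx0 : 0 < x
    · rcases h2 hx0 with hc | ⟨hc1, hc2⟩
      · rw [if_pos ⟨⟨hx0, by omega⟩, hc⟩, if_neg (by rintro ⟨⟨-, e⟩, -⟩; omega), if_pos hx0]
        ring
      · rw [if_neg (by rintro ⟨-, e⟩; omega), if_pos ⟨⟨hx0, by omega⟩, hc2⟩, if_pos hx0]
        ring
    · rw [if_neg (by tauto), if_neg (by tauto), if_neg hx0]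
      ring
  have hCU : (if ((0 < y ∧ x < M) ∧ y - 1 < t) then pvContrib item wall (y-1) x y x mk else 0)
      + (if (0 < y ∧ t = y - 1) ∧ x < s then pvContrib item wall (y-1) x y x mk else 0)
      = (if 0 < y then pvContrib item wall (y-1) x y x mk else 0) := by
    by_cases hy0 : 0 < y
    · rcases h1 hy0 with hc | ⟨hc1, hc2⟩
      · rw [if_pos ⟨⟨hy0, hx⟩, hc⟩, if_neg (by rintro ⟨⟨-, e⟩, -⟩; omega), if_pos hy0]
        ring
      · rw [if_neg (by rintro ⟨-, e⟩; omega), if_pos ⟨⟨hy0, by omega⟩, hc2⟩, if_pos hy0]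
        ring
    · rw [if_neg (by tauto), if_neg (by tauto), if_neg hy0]
      ring
  have hasm : pvInit y x mk
      + ((if ((0 < x ∧ x - 1 < M) ∧ y < t) then pvContrib item wall y (x-1) y x mk else 0)
        + (if ((0 < y ∧ x < M) ∧ y - 1 < t) then pvContrib item wall (y-1) x y x mk else 0))
      + ((if (0 < x ∧ t = y) ∧ x - 1 < s then pvContrib item wall y (x-1) y x mk else 0)
        + (if (0 < y ∧ t = y - 1) ∧ x < s then pvContrib item wall (y-1) x y x mk else 0))
      = pvInit y x mk
      + (if 0 < y then pvContrib item wall (y-1) x y x mk else 0)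
      + (if 0 < x then pvContrib item wall y (x-1) y x mk else 0) := by
    rw [← hCL, ← hCU]
    ring
  rw [hasm]
  by_cases h00 : y = 0 ∧ x = 0
  · obtain ⟨e1, e2⟩ := h00
    subst e1
    subst e2
    conv_rhs => rw [pvF]
    simp [pvInit]
  · rw [show pvInit y x mk = 0 from by simp only [pvInit]; rw [if_neg (by tauto)]]
    conv_rhs => rw [pvF]
    rw [if_neg h00]
    by_cases hw : ((y:Int), (x:Int)) ∈ wall
    · rw [if_pos hw]
      have z1 : pvContrib item wall (y-1) x y x mk = 0 := by
        simp only [pvContrib]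
        rw [if_neg (by rintro ⟨-, hnw⟩; exact hnw hw)]
      have z2 : pvContrib item wall y (x-1) y x mk = 0 := by
        simp only [pvContrib]
        rw [if_neg (by rintro ⟨-, hnw⟩; exact hnw hw)]
      rw [z1, z2]
      simp
    · rw [if_neg hw]
      have u1 : (if 0 < y then pvContrib item wall (y-1) x y x mk else 0)
          = (if 0 < y then
              (if pvBitv item ((y:Int), (x:Int)) = 0 then pvF item wall (y-1) x mk
               else if mk &&& pvBitv item ((y:Int), (x:Int)) ≠ 0 then
                 pvF item wall (y-1) x mk + pvF item wall (y-1) x (mk ^^^ pvBitv item ((y:Int), (x:Int)))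
               else 0)
            else 0) := by
        by_cases hy0 : 0 < y
        · rw [if_pos hy0, if_pos hy0]
          exact pvContrib_pred item wall (y-1) x y x mk hmk (Or.inr ⟨by omega, rfl⟩) hw
        · rw [if_neg hy0, if_neg hy0]
      have u2 : (if 0 < x then pvContrib item wall y (x-1) y x mk else 0)
          = (if 0 < x then
              (if pvBitv item ((y:Int), (x:Int)) = 0 then pvF item wall y (x-1) mk
               else if mk &&& pvBitv item ((y:Int), (x:Int)) ≠ 0 then
                 pvF item wall y (x-1) mk + pvF item wall y (x-1) (mk ^^^ pvBitv item ((y:Int), (x:Int)))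
               else 0)
            else 0) := by
        by_cases hx0 : 0 < x
        · rw [if_pos hx0, if_pos hx0]
          exact pvContrib_pred item wall y (x-1) y x mk hmk (Or.inl ⟨rfl, by omega⟩) hw
        · rw [if_neg hx0, if_neg hx0]
      rw [u1, u2]
      ring

-- one push step on a function table
lemma pvPush_tbl (n m : Int) (item wall : List (Int × Int)) {N M K : Nat}
    (hn : N = n.toNat) (hm : M = m.toNat) (hK : K = 2 ^ item.length)
    (g : Nat → Nat → Nat → Int) (t s smk : Nat) (ht : t < N) (hs : s < M) (hsm : smk < K) :
    pvPush n m item wall (pvTbl N M K g) t s smk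
      = pvTbl N M K (fun y x mk => g y x mk + pvPushAmt n m item wall g t s smk y x mk) := by
  unfold pvPush
  simp only [List.foldl_cons, List.foldl_nil, add_zero, ← Nat.cast_add_one, Int.toNat_natCast]
  have hnew1 : pvNewM item (((t:Int)), ((s+1:Nat):Int)) smk < K := hK ▸ pvNewM_lt _ _ (hK ▸ hsm)
  have hnew2 : pvNewM item ((((t+1:Nat)):Int), ((s:Int))) smk < K := hK ▸ pvNewM_lt _ _ (hK ▸ hsm)
  by_cases g1 : ((t:Int)) < n ∧ (((s+1:Nat):Int)) < m ∧ (((t:Int)), ((s+1:Nat):Int)) ∉ wall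
  · have hs1 : s + 1 < M := by omega
    rw [if_pos g1, pvGet3_tbl g ht hs hsm, pvBump_tbl g _ ht hs1 hnew1]
    set g1f : Nat → Nat → Nat → Int := fun y x mk =>
      g y x mk + if y = t ∧ x = s + 1 ∧ mk = pvNewM item (((t:Int)), ((s+1:Nat):Int)) smk
        then g t s smk else 0 with hg1f
    have hsrc1 : g1f t s smk = g t s smk := by
      rw [hg1f]
      simp only
      rw [if_neg (by rintro ⟨-, e, -⟩; omega)]
      ring
    by_cases g2 : (((t+1:Nat):Int)) < n ∧ ((s:Int)) < m ∧ ((((t+1:Nat)):Int), ((s:Int))) ∉ wall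
    · have ht1 : t + 1 < N := by omega
      rw [if_pos g2, pvGet3_tbl g1f ht hs hsm, hsrc1, pvBump_tbl g1f _ ht1 hs hnew2]
      refine pvTbl_congr fun y _ x _ mk _ => ?_
      unfold pvPushAmt
      rw [hg1f]
      simp only
      simp only [and_iff_right g1, and_iff_right g2]
      ring
    · rw [if_neg g2]
      refine pvTbl_congr fun y _ x _ mk _ => ?_
      unfold pvPushAmt
      rw [hg1f]
      simp only
      simp only [and_iff_right g1]
      rw [show (if ((((t+1:Nat):Int)) < n ∧ ((s:Int)) < m ∧ (((t+1:Nat):Int), ((s:Int))) ∉ wall)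
            ∧ y = t + 1 ∧ x = s ∧ mk = pvNewM item (((t+1:Nat):Int), ((s:Int))) smk
          then g t s smk else (0:Int)) = 0 from if_neg (fun h => g2 h.1)]
      ring
  · rw [if_neg g1]
    by_cases g2 : (((t+1:Nat):Int)) < n ∧ ((s:Int)) < m ∧ ((((t+1:Nat)):Int), ((s:Int))) ∉ wall
    · have ht1 : t + 1 < N := by omega
      rw [if_pos g2, pvGet3_tbl g ht hs hsm, pvBump_tbl g _ ht1 hs hnew2]
      refine pvTbl_congr fun y _ x _ mk _ => ?_
      unfold pvPushAmt
      simp only [and_iff_right g2]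
      rw [show (if (((t:Int)) < n ∧ (((s+1:Nat):Int)) < m ∧ (((t:Int)), ((s+1:Nat):Int)) ∉ wall)
            ∧ y = t ∧ x = s + 1 ∧ mk = pvNewM item (((t:Int)), ((s+1:Nat):Int)) smk
          then g t s smk else (0:Int)) = 0 from if_neg (fun h => g1 h.1)]
      ring
    · rw [if_neg g2]
      refine pvTbl_congr fun y _ x _ mk _ => ?_
      unfold pvPushAmt
      rw [show (if (((t:Int)) < n ∧ (((s+1:Nat):Int)) < m ∧ (((t:Int)), ((s+1:Nat):Int)) ∉ wall)
            ∧ y = t ∧ x = s + 1 ∧ mk = pvNewM item (((t:Int)), ((s+1:Nat):Int)) smk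
          then g t s smk else (0:Int)) = 0 from if_neg (fun h => g1 h.1),
        show (if ((((t+1:Nat):Int)) < n ∧ ((s:Int)) < m ∧ (((t+1:Nat):Int), ((s:Int))) ∉ wall)
            ∧ y = t + 1 ∧ x = s ∧ mk = pvNewM item (((t+1:Nat):Int), ((s:Int))) smk
          then g t s smk else (0:Int)) = 0 from if_neg (fun h => g2 h.1)]
      ring

-- the whole mask loop of one cell
lemma pvMaskFold_tbl (n m : Int) (item wall : List (Int × Int)) {N M K : Nat}
    (hn : N = n.toNat) (hm : M = m.toNat) (hK : K = 2 ^ item.length)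
    (g0 : Nat → Nat → Nat → Int) (t s : Nat) (ht : t < N) (hs : s < M) :
    (List.range K).foldl (fun ret mk =>
        if pvGet3 ret t s mk = 0 then ret else pvPush n m item wall ret t s mk)
      (pvTbl N M K g0)
      = pvTbl N M K (fun y x mk =>
          g0 y x mk + ∑ smk ∈ Finset.range K, pvPushAmt n m item wall g0 t s smk y x mk) := by
  suffices h : ∀ j, j ≤ K → (List.range j).foldl (fun ret mk =>
      if pvGet3 ret t s mk = 0 then ret else pvPush n m item wall ret t s mk)
      (pvTbl N M K g0)
      = pvTbl N M K (fun y x mk =>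
          g0 y x mk + ∑ smk ∈ Finset.range j, pvPushAmt n m item wall g0 t s smk y x mk) by
    exact h K le_rfl
  intro j
  induction j with
  | zero =>
    intro _
    simp only [List.range_zero, List.foldl_nil]
    refine (pvTbl_congr fun y _ x _ mk _ => ?_).symm
    simp
  | succ j ih =>
    intro hj
    rw [List.range_succ, List.foldl_append, ih (by omega), List.foldl_cons, List.foldl_nil]
    set gj : Nat → Nat → Nat → Int := fun y x mk =>
      g0 y x mk + ∑ smk ∈ Finset.range j, pvPushAmt n m item wall g0 t s smk y x mk with hgj
    have hsrc : ∀ mk : Nat, gj t s mk = g0 t s mk := by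
      intro mk
      rw [hgj]
      simp only
      rw [Finset.sum_eq_zero fun smk _ => pvPushAmt_src n m item wall g0 t s smk mk]
      ring
    rw [pvGet3_tbl gj ht hs (by omega)]
    by_cases hz : gj t s j = 0
    · rw [if_pos hz]
      refine pvTbl_congr fun y _ x _ mk _ => ?_
      rw [hgj]
      simp only
      rw [Finset.sum_range_succ]
      have hz0 : g0 t s j = 0 := by rw [← hsrc j]; exact hz
      have : pvPushAmt n m item wall g0 t s j y x mk = 0 := by
        unfold pvPushAmt
        rw [hz0]
        simp
      rw [this]
      ring
    · rw [if_neg hz, pvPush_tbl n m item wall hn hm hK gj t s j ht hs (by omega)]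
      refine pvTbl_congr fun y _ x _ mk _ => ?_
      rw [hgj]
      simp only
      rw [Finset.sum_range_succ]
      have hamt : pvPushAmt n m item wall gj t s j y x mk
          = pvPushAmt n m item wall g0 t s j y x mk := by
        unfold pvPushAmt
        rw [hsrc j]
      rw [hamt]
      ring

-- the summed pushes of one cell are its contribution
lemma pvPushSum_contrib (n m : Int) (item wall : List (Int × Int)) {N M K : Nat}
    (hn : N = n.toNat) (hm : M = m.toNat) (hK : K = 2 ^ item.length)
    (hn0 : 0 ≤ n) (hm0 : 0 ≤ m)
    (g0 : Nat → Nat → Nat → Int) (t s y x mk : Nat)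
    (hy : y < N) (hx : x < M) (hmk : mk < K)
    (hsrc : ∀ smk < K, g0 t s smk = pvF item wall t s smk) :
    (∑ smk ∈ Finset.range K, pvPushAmt n m item wall g0 t s smk y x mk)
      = pvContrib item wall t s y x mk := by
  subst hK
  unfold pvPushAmt pvContrib
  rw [Finset.sum_add_distrib]
  by_cases p1 : y = t ∧ x = s + 1
  · obtain ⟨e1, e2⟩ := p1
    subst e2
    have e1' : t = y := e1.symm
    subst e1'
    have hz2 : (∑ smk ∈ Finset.range (2 ^ item.length),
        if ((((t+1:Nat):Int)) < n ∧ ((s:Int)) < m ∧ (((t+1:Nat):Int), ((s:Int))) ∉ wall)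
            ∧ t = t + 1 ∧ s + 1 = s ∧ mk = pvNewM item (((t+1:Nat):Int), ((s:Int))) smk
          then g0 t s smk else (0:Int)) = 0 := by
      refine Finset.sum_eq_zero fun smk _ => ?_
      rw [if_neg]
      rintro ⟨-, e, -⟩
      omega
    rw [hz2]
    have hl1 : ((t:Int)) < n := by omega
    have hl2 : (((s+1:Nat):Int)) < m := by omega
    by_cases hwall : (((t:Int)), ((s+1:Nat):Int)) ∈ wall
    · rw [if_neg (by rintro ⟨-, hnw⟩; exact hnw hwall)]
      rw [Finset.sum_eq_zero fun smk _ => if_neg (by rintro ⟨⟨-, -, hnw⟩, -⟩; exact hnw hwall)]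
      ring
    · rw [if_pos ⟨Or.inl ⟨rfl, rfl⟩, hwall⟩]
      have hcong : ∀ smk ∈ Finset.range (2 ^ item.length),
          (if (((t:Int)) < n ∧ (((s+1:Nat):Int)) < m ∧ (((t:Int)), ((s+1:Nat):Int)) ∉ wall)
              ∧ t = t ∧ s + 1 = s + 1 ∧ mk = pvNewM item (((t:Int)), ((s+1:Nat):Int)) smk
            then g0 t s smk else (0:Int))
          = (if mk = pvNewM item (((t:Int)), ((s+1:Nat):Int)) smk
            then pvF item wall t s smk else 0) := by
        intro smk hsmk
        rw [if_congr (Iff.intro (fun h => h.2.2.2)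
            (fun h => ⟨⟨hl1, hl2, hwall⟩, rfl, rfl, h⟩)) rfl rfl,
          hsrc smk (Finset.mem_range.1 hsmk)]
      rw [Finset.sum_congr rfl hcong]
      ring
  · by_cases p2 : y = t + 1 ∧ x = s
    · obtain ⟨e1, e2⟩ := p2
      subst e1
      have e2' : s = x := e2.symm
      subst e2'
      have hz1 : (∑ smk ∈ Finset.range (2 ^ item.length),
          if (((t:Int)) < n ∧ (((s+1:Nat):Int)) < m ∧ (((t:Int)), ((s+1:Nat):Int)) ∉ wall)
              ∧ t + 1 = t ∧ s = s + 1 ∧ mk = pvNewM item (((t:Int)), ((s+1:Nat):Int)) smk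
            then g0 t s smk else (0:Int)) = 0 := by
        refine Finset.sum_eq_zero fun smk _ => ?_
        rw [if_neg]
        rintro ⟨-, e, -⟩
        omega
      rw [hz1]
      have hl1 : (((t+1:Nat):Int)) < n := by omega
      have hl2 : ((s:Int)) < m := by omega
      by_cases hwall : ((((t+1:Nat)):Int), ((s:Int))) ∈ wall
      · rw [if_neg (by rintro ⟨-, hnw⟩; exact hnw hwall)]
        rw [Finset.sum_eq_zero fun smk _ => if_neg (by rintro ⟨⟨-, -, hnw⟩, -⟩; exact hnw hwall)]
        ring
      · rw [if_pos ⟨Or.inr ⟨rfl, rfl⟩, hwall⟩]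
        have hcong : ∀ smk ∈ Finset.range (2 ^ item.length),
            (if ((((t+1:Nat):Int)) < n ∧ ((s:Int)) < m ∧ (((t+1:Nat):Int), ((s:Int))) ∉ wall)
                ∧ t + 1 = t + 1 ∧ s = s ∧ mk = pvNewM item (((t+1:Nat):Int), ((s:Int))) smk
              then g0 t s smk else (0:Int))
            = (if mk = pvNewM item (((t+1:Nat):Int), ((s:Int))) smk
              then pvF item wall t s smk else 0) := by
          intro smk hsmk
          rw [if_congr (Iff.intro (fun h => h.2.2.2)
              (fun h => ⟨⟨hl1, hl2, hwall⟩, rfl, rfl, h⟩)) rfl rfl,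
            hsrc smk (Finset.mem_range.1 hsmk)]
        rw [Finset.sum_congr rfl hcong]
        ring
    · rw [if_neg (by rintro ⟨h, -⟩; rcases h with e | e; exacts [p1 e, p2 e])]
      rw [Finset.sum_eq_zero fun smk _ => if_neg (by rintro ⟨-, e1, e2, -⟩; exact p1 ⟨e1, e2⟩),
        Finset.sum_eq_zero fun smk _ => if_neg (by rintro ⟨-, e1, e2, -⟩; exact p2 ⟨e1, e2⟩)]
      ring

-- the A-side main invariant, assembled over the two outer loops
lemma pvA_fold (n m : Int) (item wall : List (Int × Int)) {N M K : Nat}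
    (hn : N = n.toNat) (hm : M = m.toNat) (hK : K = 2 ^ item.length)
    (hn0 : 0 ≤ n) (hm0 : 0 ≤ m) :
    (List.range N).foldl (fun ret y =>
      (List.range M).foldl (fun ret x =>
        (List.range K).foldl (fun ret mk =>
          if pvGet3 ret y x mk = 0 then ret else pvPush n m item wall ret y x mk) ret) ret)
      (pvTbl N M K (fun y x mk => pvValRows item wall M 0 y x mk))
      = pvTbl N M K (fun y x mk => pvValRows item wall M N y x mk) := by
  have hrow : ∀ t, t < N → ∀ j, j ≤ M →
      (List.range j).foldl (fun ret x =>
        (List.range K).foldl (fun ret mk =>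
          if pvGet3 ret t x mk = 0 then ret else pvPush n m item wall ret t x mk) ret)
        (pvTbl N M K (fun y x mk => pvValRows item wall M t y x mk))
      = pvTbl N M K (fun y x mk => pvValMid item wall M t j y x mk) := by
    intro t ht j
    induction j with
    | zero =>
      intro _
      simp only [List.range_zero, List.foldl_nil]
      refine pvTbl_congr fun y _ x _ mk _ => ?_
      simp [pvValMid]
    | succ j ih =>
      intro hj
      rw [List.range_succ, List.foldl_append, ih (by omega), List.foldl_cons, List.foldl_nil,
        pvMaskFold_tbl n m item wall hn hm hK _ t j ht (by omega)]
      refine pvTbl_congr fun y hy x hx mk hmk => ?_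
      rw [pvPushSum_contrib n m item wall hn hm hK hn0 hm0 _ t j y x mk hy hx hmk
        (fun smk hsmk => pvValMid_closed item wall M t j t j smk (by omega) (hK ▸ hsmk)
          (fun h0 => Or.inl (by omega)) (fun h0 => Or.inr ⟨rfl, by omega⟩))]
      simp only [pvValMid]
      rw [Finset.sum_range_succ]
      ring
  suffices h : ∀ u, u ≤ N → (List.range u).foldl (fun ret y =>
      (List.range M).foldl (fun ret x =>
        (List.range K).foldl (fun ret mk =>
          if pvGet3 ret y x mk = 0 then ret else pvPush n m item wall ret y x mk) ret) ret)
      (pvTbl N M K (fun y x mk => pvValRows item wall M 0 y x mk))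
      = pvTbl N M K (fun y x mk => pvValRows item wall M u y x mk) by
    exact h N le_rfl
  intro u
  induction u with
  | zero =>
    intro _
    simp
  | succ u ihu =>
    intro hu
    rw [List.range_succ, List.foldl_append, ihu (by omega), List.foldl_cons, List.foldl_nil,
      hrow u (by omega) M le_rfl]
    refine pvTbl_congr fun y _ x _ mk _ => ?_
    simp only [pvValMid, pvValRows]
    rw [Finset.sum_range_succ]
    ring

-- ---------- the B side ----------

def pvRow (item wall : List (Int × Int)) (M K y : Nat) : List (List Int) :=
  (List.range M).map fun x => (List.range K).map fun mk => pvF item wall y x mk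

lemma pvCell_eq (item wall : List (Int × Int)) (prev cur : List (List Int)) {M : Nat}
    (y x : Nat) (hx : x < M)
    (hprev : 0 < y → prev = pvRow item wall M (2 ^ item.length) (y - 1))
    (hcur : cur = (List.range x).map (fun x' => (List.range (2 ^ item.length)).map
      (fun mk => pvF item wall y x' mk))) :
    pvCell item wall prev cur y x (2 ^ item.length)
      = (List.range (2 ^ item.length)).map (fun mk => pvF item wall y x mk) := by
  have hK0 : 0 < 2 ^ item.length := by positivity
  have hrepl : (List.replicate (2 ^ item.length) (0:Int))
      = (List.range (2 ^ item.length)).map (fun _ => (0:Int)) := by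
    rw [List.map_const', List.length_range]
  simp only [pvCell]
  by_cases h00 : y = 0 ∧ x = 0
  · rw [if_pos h00]
    obtain ⟨e1, e2⟩ := h00
    subst e1
    subst e2
    rw [hrepl, pvSet_map_range _ _ _ _ hK0]
    refine List.map_congr_left fun mk _ => ?_
    rw [pvF]
    simp
  · rw [if_neg h00]
    by_cases hw : ((y:Int), (x:Int)) ∈ wall
    · rw [if_pos hw, hrepl]
      refine List.map_congr_left fun mk _ => ?_
      rw [pvF, if_neg h00, if_pos hw]
    · rw [if_neg hw]
      refine List.map_congr_left fun mk hmk => ?_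
      have hmk' : mk < 2 ^ item.length := List.mem_range.1 hmk
      have hxor : mk ^^^ pvBitv item ((y:Int), (x:Int)) < 2 ^ item.length :=
        Nat.xor_lt_two_pow hmk' (pvBitv_lt item ((y:Int), (x:Int)))
      have hU1 : ∀ mkk : Nat, mkk < 2 ^ item.length → 0 < y →
          (prev.getD x []).getD mkk 0 = pvF item wall (y-1) x mkk := by
        intro mkk hlt hy0
        rw [hprev hy0]
        unfold pvRow
        rw [PySem.List.getD_map_range _ _ _ _ hx, PySem.List.getD_map_range _ _ _ _ hlt]
      have hL1 : ∀ mkk : Nat, mkk < 2 ^ item.length → 0 < x →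
          (cur.getD (x-1) []).getD mkk 0 = pvF item wall y (x-1) mkk := by
        intro mkk hlt hx0
        rw [hcur, PySem.List.getD_map_range _ _ _ _ (by omega : x - 1 < x),
          PySem.List.getD_map_range _ _ _ _ hlt]
      conv_rhs => rw [pvF]
      rw [if_neg h00, if_neg hw]
      by_cases hb : pvBitv item ((y:Int), (x:Int)) = 0
      · rw [if_pos hb, if_pos hb, if_pos hb]
        have eU : (if 0 < y then (prev.getD x []).getD mk 0 else 0)
            = (if 0 < y then pvF item wall (y-1) x mk else 0) := by
          by_cases hy0 : 0 < y
          · rw [if_pos hy0, if_pos hy0, hU1 mk hmk' hy0]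
          · rw [if_neg hy0, if_neg hy0]
        have eL : (if 0 < x then (cur.getD (x-1) []).getD mk 0 else 0)
            = (if 0 < x then pvF item wall y (x-1) mk else 0) := by
          by_cases hx0 : 0 < x
          · rw [if_pos hx0, if_pos hx0, hL1 mk hmk' hx0]
          · rw [if_neg hx0, if_neg hx0]
        rw [eU, eL]
      · rw [if_neg hb, if_neg hb, if_neg hb]
        by_cases hand : mk &&& pvBitv item ((y:Int), (x:Int)) ≠ 0
        · rw [if_pos hand, if_pos hand, if_pos hand]
          have eU : (if 0 < y then (prev.getD x []).getD mk 0
                + (prev.getD x []).getD (mk ^^^ pvBitv item ((y:Int), (x:Int))) 0 else 0)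
              = (if 0 < y then pvF item wall (y-1) x mk
                + pvF item wall (y-1) x (mk ^^^ pvBitv item ((y:Int), (x:Int))) else 0) := by
            by_cases hy0 : 0 < y
            · rw [if_pos hy0, if_pos hy0, hU1 mk hmk' hy0, hU1 _ hxor hy0]
            · rw [if_neg hy0, if_neg hy0]
          have eL : (if 0 < x then (cur.getD (x-1) []).getD mk 0
                + (cur.getD (x-1) []).getD (mk ^^^ pvBitv item ((y:Int), (x:Int))) 0 else 0)
              = (if 0 < x then pvF item wall y (x-1) mk
                + pvF item wall y (x-1) (mk ^^^ pvBitv item ((y:Int), (x:Int))) else 0) := by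
            by_cases hx0 : 0 < x
            · rw [if_pos hx0, if_pos hx0, hL1 mk hmk' hx0, hL1 _ hxor hx0]
            · rw [if_neg hx0, if_neg hx0]
          rw [eU, eL]
        · rw [if_neg hand, if_neg hand, if_neg hand]
          simp

lemma pvB_fold (item wall : List (Int × Int)) {M K : Nat} (hK : K = 2 ^ item.length)
    (N : Nat) (hN : 0 < N) :
    (List.range N).foldl (fun prev y =>
      (List.range M).foldl (fun cur x =>
        cur ++ [pvCell item wall prev cur y x K]) []) []
      = pvRow item wall M K (N - 1) := by
  subst hK
  have hrow : ∀ (prev : List (List Int)) (y : Nat),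
      (0 < y → prev = pvRow item wall M (2 ^ item.length) (y - 1)) → ∀ j, j ≤ M →
      (List.range j).foldl (fun cur x =>
        cur ++ [pvCell item wall prev cur y x (2 ^ item.length)]) []
      = (List.range j).map (fun x' => (List.range (2 ^ item.length)).map
          (fun mk => pvF item wall y x' mk)) := by
    intro prev y hprev j
    induction j with
    | zero =>
      intro _
      simp
    | succ j ih =>
      intro hj
      rw [List.range_succ, List.foldl_append, ih (by omega), List.foldl_cons, List.foldl_nil,
        List.map_append, pvCell_eq item wall prev _ y j (by omega) hprev rfl]
      simp
  have aux : ∀ u : Nat, (List.range (u+1)).foldl (fun prev y =>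
      (List.range M).foldl (fun cur x =>
        cur ++ [pvCell item wall prev cur y x (2 ^ item.length)]) []) []
      = pvRow item wall M (2 ^ item.length) u := by
    intro u
    induction u with
    | zero =>
      rw [List.range_one, List.foldl_cons, List.foldl_nil]
      exact hrow [] 0 (by omega) M le_rfl
    | succ u ihu =>
      rw [List.range_succ, List.foldl_append, ihu, List.foldl_cons, List.foldl_nil]
      exact hrow (pvRow item wall M (2 ^ item.length) u) (u+1) (fun _ => by simp) M le_rfl
  obtain ⟨u, rfl⟩ : ∃ u, N = u + 1 := ⟨N - 1, by omega⟩
  simpa using aux u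

-- ===== VERDICT (by name: the statement is the Claim_ definition above) =====
theorem dp_spec : Claim_equal_dp := by
  intro n m item wall hdom hpre
  obtain ⟨hn1, hm1⟩ := hpre
  unfold Spec_dp
  simp only [dp, dp_alt]
  set N := n.toNat with hN
  set M := m.toNat with hM
  set K := 2 ^ item.length with hKdef
  have hN0 : 0 < N := by omega
  have hM0 : 0 < M := by omega
  have hK0 : 0 < K := by positivity
  have hret0 : List.replicate N (List.replicate M (List.replicate K (0:Int)))
      = pvTbl N M K (fun _ _ _ => 0) := by
    unfold pvTbl
    simp [List.map_const', List.length_range]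
  have e1 : pvSet3 (pvTbl N M K (fun _ _ _ => (0:Int))) 0 0 0 1
      = pvTbl N M K (fun y x mk => pvValRows item wall M 0 y x mk) := by
    rw [pvSet3_tbl _ _ hN0 hM0 hK0]
    refine pvTbl_congr fun y _ x _ mk _ => ?_
    simp [pvValRows, pvInit]
  rw [hret0, e1, pvA_fold n m item wall hN hM hKdef (by omega) (by omega)]
  have hidx1 : (n-1).toNat = N - 1 := by omega
  have hidx2 : (m-1).toNat = M - 1 := by omega
  rw [hidx1, hidx2, pvGet3_tbl _ (by omega) (by omega) (by omega)]
  have hval : pvValRows item wall M N (N-1) (M-1) (K-1) = pvF item wall (N-1) (M-1) (K-1) := by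
    have h := pvValMid_closed item wall M N 0 (N-1) (M-1) (K-1) (by omega)
      (hKdef ▸ (by omega : K - 1 < K))
      (fun _ => Or.inl (by omega)) (fun _ => Or.inl (by omega))
    simpa [pvValMid] using h
  rw [hval, pvB_fold item wall hKdef N hN0]
  unfold pvRow
  rw [PySem.List.getD_map_range _ _ _ _ (by omega : M - 1 < M),
    PySem.List.getD_map_range _ _ _ _ (by omega : K - 1 < K)]
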